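-- pv_equiv track=rewrite | github.com/jenlcmc/graphrag_tax | src/ingestion/irs_xml_parser.py | _unique_section_id
-- ===== SOURCE A (Python) =====
-- def _unique_section_id(base: str, element_id: str, seen_section_ids: set[str]) -> str:
--     """Return a deterministic unique section_id for graph/index node keys."""
--     if base not in seen_section_ids:
--         seen_section_ids.add(base)
--         return base
--
--     with_element = f"{base} [{element_id}]"
--     if with_element not in seen_section_ids:
--         seen_section_ids.add(with_element)
--         return with_element
--
--     suffix = 2
--     while True:
--         candidate = f"{with_element}#{suffix}"
--         if candidate not in seen_section_ids:
--             seen_section_ids.add(candidate)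
--             return candidate
--         suffix += 1
-- ===== SOURCE B (Python) =====
-- def _unique_section_id(base: str, element_id: str, seen_section_ids: set[str]) -> str:
--     """Return a deterministic unique section_id for graph/index node keys."""
--     if base not in seen_section_ids:
--         seen_section_ids.add(base)
--         return base
--
--     with_element = f"{base} [{element_id}]"
--     if with_element not in seen_section_ids:
--         seen_section_ids.add(with_element)
--         return with_element
--
--     # Harvest every numeric suffix already taken for this prefix in ONE pass,
--     # then compute the first gap >= 2 by scanning the sorted suffix numbers.
--     prefix = with_element + "#"
--     used = set()
--     for s in seen_section_ids:
--         if s.startswith(prefix):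
--             tail = s[len(prefix):]
--             if tail.isdigit() and not tail.startswith("0"):
--                 used.add(int(tail))
--     suffix = 2
--     for n in sorted(used):
--         if n == suffix:
--             suffix += 1
--         elif n > suffix:
--             break
--     result = prefix + str(suffix)
--     seen_section_ids.add(result)
--     return result
-- ===== Notes on version B (the rewrite author's own statement) =====
-- stated objective: alternative
-- what changed: A probes candidate strings base [id]#2, #3, ... one by one against the seen set until a free one appears; B instead makes one harvesting pass over the seen set extracting every numeric suffix already taken for the prefix (startswith + canonical-digit parse), then computes the first free suffix >= 2 as the first gap in the sorted suffix numbers.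
import Mathlib
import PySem

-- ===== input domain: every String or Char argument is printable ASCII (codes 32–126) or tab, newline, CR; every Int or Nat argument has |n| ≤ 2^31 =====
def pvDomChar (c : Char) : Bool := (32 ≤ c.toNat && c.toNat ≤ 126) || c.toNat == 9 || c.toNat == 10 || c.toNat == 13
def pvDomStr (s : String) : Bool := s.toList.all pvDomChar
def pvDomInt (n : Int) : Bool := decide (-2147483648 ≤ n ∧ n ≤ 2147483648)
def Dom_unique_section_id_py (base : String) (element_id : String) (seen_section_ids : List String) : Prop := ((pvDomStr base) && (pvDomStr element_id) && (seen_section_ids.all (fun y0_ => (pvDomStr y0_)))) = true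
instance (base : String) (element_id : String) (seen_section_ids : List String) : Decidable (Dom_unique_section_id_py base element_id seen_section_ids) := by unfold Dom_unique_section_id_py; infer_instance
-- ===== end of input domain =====

-- B replaces A's unbounded membership-probe loop over suffixed candidates by one harvesting
-- pass (extract every numeric suffix already taken for the prefix) followed by a first-gap
-- scan of the sorted suffix numbers.  Equivalence is about the RETURN value only (both
-- Pythons also add the returned id to the seen set identically).

-- ===== PORT A =====
-- A's `while True` probe; Python terminates because the seen set is finite: among the
-- seen.length+1 distinct candidates one is free, so the fuel seen.length+1 is never
-- exhausted (the fuel-0 arm is unreachable, a totality guard).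
def pvA_loop (with_element : String) (seen : List String) (suffix : Int) : Nat → String
  | 0 => with_element ++ "#" ++ PySem.Int.toStr suffix
  | fuel + 1 =>
      let candidate := with_element ++ "#" ++ PySem.Int.toStr suffix
      if candidate ∈ seen then pvA_loop with_element seen (suffix + 1) fuel
      else candidate

def unique_section_id_py (base : String) (element_id : String) (seen_section_ids : List String) : String :=
  if base ∉ seen_section_ids then base
  else
    let with_element := base ++ " [" ++ element_id ++ "]"
    if with_element ∉ seen_section_ids then with_element
    else pvA_loop with_element seen_section_ids 2 (seen_section_ids.length + 1)

-- ===== PORT B =====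
-- int(tail), reached only under the tail.isdigit() guard, where it is exactly this digit fold
def pvDigitVal (t : List Char) : Nat := t.foldl (fun a c => 10 * a + (c.toNat - 48)) 0

-- the body of Source B's harvesting pass: the numeric suffix s carries for the given prefix, if
-- any (s[len(prefix):] on a nonnegative in-range index is List.drop — PySem.List.slice_from)
def pvSuffixNum? (pre : List Char) (s : List Char) : Option Nat :=
  if PySem.Chars.startswith s pre then
    let tail := s.drop pre.length
    if PySem.Chars.strIsdigit tail && !(PySem.Chars.startswith tail ['0']) then
      some (pvDigitVal tail)
    else none
  else none

-- Source B's `for s in seen_section_ids: … used.add(int(tail))` pass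
def pvUsed (pre : List Char) (seen : List String) : PySem.Set Nat :=
  seen.foldl (fun u s =>
    match pvSuffixNum? pre s.toList with
    | some v => PySem.Set.add u v
    | none => u) []

-- Source B's `for n in sorted(used): …` first-gap scan (break = return the current suffix)
def pvGapScan (ns : List Nat) (suffix : Nat) : Nat :=
  match ns with
  | [] => suffix
  | n :: rest => if n = suffix then pvGapScan rest (suffix + 1)
                 else if suffix < n then suffix
                 else pvGapScan rest suffix

def unique_section_id_py_alt (base : String) (element_id : String) (seen_section_ids : List String) : String :=
  if base ∉ seen_section_ids then base
  else
    let with_element := base ++ " [" ++ element_id ++ "]"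
    if with_element ∉ seen_section_ids then with_element
    else
      let pre := with_element ++ "#"
      let used := pvUsed pre.toList seen_section_ids
      let suffix := pvGapScan (PySem.List.sorted used (fun n => n)) 2
      pre ++ PySem.Int.toStr (Int.ofNat suffix)

-- ===== PRECONDITION & SPEC =====
def Spec_unique_section_id_py (base : String) (element_id : String) (seen_section_ids : List String) (out : String) : Prop := out = unique_section_id_py_alt base element_id seen_section_ids
instance (base : String) (element_id : String) (seen_section_ids : List String) (out : String) : Decidable (Spec_unique_section_id_py base element_id seen_section_ids out) := by unfold Spec_unique_section_id_py; infer_instance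

-- ===== CLAIM (what is proved, stated in full; the proofs are below) =====
def Claim_equal_unique_section_id_py : Prop := ∀ (base : String) (element_id : String) (seen_section_ids : List String), Dom_unique_section_id_py base element_id seen_section_ids → Spec_unique_section_id_py base element_id seen_section_ids (unique_section_id_py base element_id seen_section_ids)

-- ===== LEMMAS AND PROOFS =====

-- ---- decimal representation: facts about Nat.toDigits 10 ----

theorem pv_core_acc (f : Nat) : ∀ (n : Nat) (ds : List Char),
    Nat.toDigitsCore 10 f n ds = Nat.toDigitsCore 10 f n [] ++ ds := by
  induction f with
  | zero => intro n ds; simp [Nat.toDigitsCore]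
  | succ g ih =>
      intro n ds
      simp only [Nat.toDigitsCore]
      by_cases h : n / 10 = 0
      · simp [h]
      · simp only [h, ite_false]
        rw [ih (n / 10) (Nat.digitChar (n % 10) :: ds), ih (n / 10) [Nat.digitChar (n % 10)]]
        simp

theorem pv_core_fuel (f1 : Nat) : ∀ (f2 n : Nat) (ds : List Char), n < f1 → n < f2 →
    Nat.toDigitsCore 10 f1 n ds = Nat.toDigitsCore 10 f2 n ds := by
  induction f1 with
  | zero => intro f2 n ds h1 h2; omega
  | succ g ih =>
      intro f2 n ds h1 h2
      match f2, h2 with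
      | h + 1, _ =>
        simp only [Nat.toDigitsCore]
        by_cases hz : n / 10 = 0
        · simp [hz]
        · simp only [hz, ite_false]
          have hn : 0 < n := by
            rcases Nat.eq_zero_or_pos n with h | h
            · subst h; simp at hz
            · exact h
          have hd : n / 10 < n := Nat.div_lt_self hn (by norm_num)
          exact ih h (n / 10) _ (by omega) (by omega)

theorem pv_toDigits_lt (n : Nat) (h : n < 10) : Nat.toDigits 10 n = [Nat.digitChar n] := by
  unfold Nat.toDigits
  simp only [Nat.toDigitsCore]
  rw [if_pos (Nat.div_eq_of_lt h), Nat.mod_eq_of_lt h]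

theorem pv_toDigits_step (m d : Nat) (hm : 1 ≤ m) (hd : d < 10) :
    Nat.toDigits 10 (10 * m + d) = Nat.toDigits 10 m ++ [Nat.digitChar d] := by
  unfold Nat.toDigits
  have hdiv : (10 * m + d) / 10 = m := by omega
  have hmod : (10 * m + d) % 10 = d := by omega
  have h1 : Nat.toDigitsCore 10 (10 * m + d + 1) (10 * m + d) []
      = Nat.toDigitsCore 10 (10 * m + d) m [Nat.digitChar d] := by
    simp only [Nat.toDigitsCore]
    rw [hdiv, hmod, if_neg (by omega)]
  rw [h1, pv_core_acc (10 * m + d) m [Nat.digitChar d],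
      pv_core_fuel (10 * m + d) (m + 1) m [] (by omega) (by omega)]

theorem pv_digitVal_append (t : List Char) (c : Char) :
    pvDigitVal (t ++ [c]) = 10 * pvDigitVal t + (c.toNat - 48) := by
  unfold pvDigitVal
  rw [List.foldl_append]
  simp

theorem pv_digitChar_val (d : Nat) (h : d < 10) : (Nat.digitChar d).toNat - 48 = d := by
  interval_cases d <;> decide

theorem pv_digitVal_toDigits (n : Nat) : pvDigitVal (Nat.toDigits 10 n) = n := by
  induction n using Nat.strong_induction_on with
  | _ n ih =>
    by_cases h : n < 10
    · rw [pv_toDigits_lt n h]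
      show pvDigitVal ([] ++ [Nat.digitChar n]) = n
      rw [pv_digitVal_append, pv_digitChar_val n h]; simp [pvDigitVal]
    · have h10 : 10 ≤ n := by omega
      have : n = 10 * (n / 10) + n % 10 := by omega
      rw [this, pv_toDigits_step (n / 10) (n % 10) (by omega) (by omega),
          pv_digitVal_append, ih (n / 10) (by omega)]
      rw [pv_digitChar_val (n % 10) (by omega)]

theorem pv_digitChar_isdigit (d : Nat) (h : d < 10) : PySem.Chars.isdigit (Nat.digitChar d) = true := by
  interval_cases d <;> decide

theorem pv_toDigits_all_digits (n : Nat) : (Nat.toDigits 10 n).all PySem.Chars.isdigit = true := by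
  induction n using Nat.strong_induction_on with
  | _ n ih =>
    by_cases h : n < 10
    · rw [pv_toDigits_lt n h]; simp [pv_digitChar_isdigit n h]
    · have : n = 10 * (n / 10) + n % 10 := by omega
      rw [this, pv_toDigits_step (n / 10) (n % 10) (by omega) (by omega)]
      simp only [List.all_append]
      rw [ih (n / 10) (by omega)]
      simp [pv_digitChar_isdigit (n % 10) (by omega)]

theorem pv_toDigits_ne_nil (n : Nat) : Nat.toDigits 10 n ≠ [] := by
  by_cases h : n < 10
  · rw [pv_toDigits_lt n h]; simp
  · have : n = 10 * (n / 10) + n % 10 := by omega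
    rw [this, pv_toDigits_step (n / 10) (n % 10) (by omega) (by omega)]
    simp

theorem pv_toDigits_head_ne_zero (n : Nat) (h : 1 ≤ n) :
    ∀ c rest, Nat.toDigits 10 n = c :: rest → c ≠ '0' := by
  induction n using Nat.strong_induction_on with
  | _ n ih =>
    intro c rest hc
    by_cases h10 : n < 10
    · rw [pv_toDigits_lt n h10] at hc
      cases hc
      interval_cases n <;> decide
    · have he : n = 10 * (n / 10) + n % 10 := by omega
      rw [he, pv_toDigits_step (n / 10) (n % 10) (by omega) (by omega)] at hc
      obtain ⟨c', rest', hx⟩ : ∃ c' rest', Nat.toDigits 10 (n / 10) = c' :: rest' := by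
        cases hd : Nat.toDigits 10 (n / 10) with
        | nil => exact absurd hd (pv_toDigits_ne_nil _)
        | cons a b => exact ⟨a, b, rfl⟩
      rw [hx] at hc
      simp at hc
      rw [← hc.1]
      exact ih (n / 10) (by omega) (by omega) c' rest' hx

theorem pv_char_toNat_inj (a b : Char) (h : a.toNat = b.toNat) : a = b := by
  apply Char.ext
  exact UInt32.toNat_inj.mp h

theorem pv_isdigit_toNat (c : Char) (h : PySem.Chars.isdigit c = true) :
    48 ≤ c.toNat ∧ c.toNat ≤ 57 := by
  simp [PySem.Chars.isdigit] at h
  obtain ⟨h1, h2⟩ := h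
  exact ⟨h1, h2⟩

theorem pv_digitChar_of_digit (c : Char) (h : PySem.Chars.isdigit c = true) :
    Nat.digitChar (c.toNat - 48) = c := by
  obtain ⟨h1, h2⟩ := pv_isdigit_toNat c h
  apply pv_char_toNat_inj
  have hd : c.toNat - 48 < 10 := by omega
  have : (Nat.digitChar (c.toNat - 48)).toNat = (c.toNat - 48) + 48 := by
    interval_cases h : (c.toNat - 48) <;> simp [Nat.digitChar]
  omega

theorem pv_foldl_le (t : List Char) : ∀ a : Nat,
    a ≤ t.foldl (fun a c => 10 * a + (c.toNat - 48)) a := by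
  induction t with
  | nil => intro a; simp
  | cons c rest ih =>
      intro a
      simp only [List.foldl_cons]
      calc a ≤ 10 * a + (c.toNat - 48) := by omega
        _ ≤ _ := ih _

theorem pv_digitVal_pos (t : List Char) (c : Char) (hc : PySem.Chars.isdigit c = true)
    (h0 : c ≠ '0') : 1 ≤ pvDigitVal (c :: t) := by
  have h1 : 49 ≤ c.toNat := by
    obtain ⟨ha, hb⟩ := pv_isdigit_toNat c hc
    rcases Nat.lt_or_ge c.toNat 49 with h | h
    · exfalso
      apply h0
      apply pv_char_toNat_inj
      show c.toNat = 48
      omega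
    · exact h
  unfold pvDigitVal
  simp only [List.foldl_cons]
  calc 1 ≤ 10 * 0 + (c.toNat - 48) := by omega
    _ ≤ _ := pv_foldl_le t _

-- uniqueness: a canonical digit string is THE decimal rendering of its value
theorem pv_toDigits_of_canon (t : List Char) (hne : t ≠ [])
    (hdig : t.all PySem.Chars.isdigit = true)
    (hhead : ∀ c rest, t = c :: rest → c ≠ '0') :
    Nat.toDigits 10 (pvDigitVal t) = t := by
  induction t using List.reverseRecOn with
  | nil => exact absurd rfl hne
  | append_singleton t' c ih =>
      have hdig' : t'.all PySem.Chars.isdigit = true := by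
        simp only [List.all_append] at hdig
        exact (Bool.and_eq_true_iff.mp hdig).1
      have hc : PySem.Chars.isdigit c = true := by
        simp only [List.all_append] at hdig
        have := (Bool.and_eq_true_iff.mp hdig).2
        simpa using this
      have hcv : c.toNat - 48 < 10 := by
        obtain ⟨h1, h2⟩ := pv_isdigit_toNat c hc
        omega
      rw [pv_digitVal_append]
      cases t' with
      | nil =>
          simp only [pvDigitVal, List.foldl_nil]
          rw [Nat.mul_zero, Nat.zero_add, pv_toDigits_lt _ hcv, pv_digitChar_of_digit c hc]
          simp
      | cons c0 rest =>
          have hh0 : c0 ≠ '0' := hhead c0 (rest ++ [c]) (by simp)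
          have hc0 : PySem.Chars.isdigit c0 = true := by
            simp only [List.all_cons] at hdig'
            exact (Bool.and_eq_true_iff.mp hdig').1
          have hpos : 1 ≤ pvDigitVal (c0 :: rest) := pv_digitVal_pos rest c0 hc0 hh0
          rw [pv_toDigits_step _ _ hpos hcv,
              ih (by simp) hdig' (fun a b hab => by cases hab; exact hh0),
              pv_digitChar_of_digit c hc]

-- ---- the suffix parser vs the candidate builder ----

theorem pv_parse_cand (pre : List Char) (k : Nat) (hk : 1 ≤ k) :
    pvSuffixNum? pre (pre ++ Nat.toDigits 10 k) = some k := by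
  obtain ⟨c, rest, hcr⟩ : ∃ c rest, Nat.toDigits 10 k = c :: rest := by
    cases hd : Nat.toDigits 10 k with
    | nil => exact absurd hd (pv_toDigits_ne_nil _)
    | cons a b => exact ⟨a, b, rfl⟩
  have hc0 : c ≠ '0' := pv_toDigits_head_ne_zero k hk c rest hcr
  unfold pvSuffixNum?
  rw [if_pos (by rw [PySem.Chars.startswith_iff]; exact List.prefix_append _ _)]
  simp only [List.drop_left]
  rw [if_pos]
  · rw [pv_digitVal_toDigits]
  · apply Bool.and_eq_true_iff.mpr
    constructor
    · simp only [PySem.Chars.strIsdigit, Bool.and_eq_true_iff]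
      constructor
      · simp [pv_toDigits_ne_nil k]
      · exact pv_toDigits_all_digits k
    · rw [hcr]
      simp [PySem.Chars.startswith, List.isPrefixOf]
      intro h
      exact absurd h.symm hc0

theorem pv_parse_sound (pre s : List Char) (k : Nat) (h : pvSuffixNum? pre s = some k) :
    s = pre ++ Nat.toDigits 10 k ∧ 1 ≤ k := by
  unfold pvSuffixNum? at h
  by_cases h1 : PySem.Chars.startswith s pre = true
  · rw [if_pos h1] at h
    rw [PySem.Chars.startswith_iff] at h1
    have hs : pre ++ s.drop pre.length = s := by
      obtain ⟨u, hu⟩ := h1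
      rw [← hu]; simp
    set t := s.drop pre.length with ht
    by_cases h2 : (PySem.Chars.strIsdigit t && !PySem.Chars.startswith t ['0']) = true
    · rw [if_pos h2] at h
      simp only [Option.some.injEq] at h
      obtain ⟨hd, h0⟩ := Bool.and_eq_true_iff.mp h2
      have hne : t ≠ [] := by
        intro hnil
        rw [hnil] at hd
        simp [PySem.Chars.strIsdigit] at hd
      have hall : t.all PySem.Chars.isdigit = true := by
        simp only [PySem.Chars.strIsdigit, Bool.and_eq_true_iff] at hd
        exact hd.2
      have hhead : ∀ c rest, t = c :: rest → c ≠ '0' := by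
        intro c rest hcr he
        rw [hcr, he] at h0
        simp [PySem.Chars.startswith, List.isPrefixOf] at h0
      have hcanon := pv_toDigits_of_canon t hne hall hhead
      constructor
      · rw [← h, hcanon, hs]
      · obtain ⟨c, rest, hcr⟩ : ∃ c rest, t = c :: rest := by
          cases hx : t with
          | nil => exact absurd hx hne
          | cons a b => exact ⟨a, b, rfl⟩
        have hcdig : PySem.Chars.isdigit c = true := by
          rw [hcr] at hall
          simp only [List.all_cons, Bool.and_eq_true_iff] at hall
          exact hall.1
        rw [← h, hcr]
        exact pv_digitVal_pos rest c hcdig (hhead c rest hcr)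
    · rw [if_neg h2] at h
      exact absurd h (by simp)
  · rw [if_neg h1] at h
    exact absurd h (by simp)

-- ---- the harvested set pvUsed ----

theorem pv_mem_used_aux (pre : List Char) (seen : List String) :
    ∀ (acc : PySem.Set Nat) (k : Nat),
      k ∈ seen.foldl (fun u s => match pvSuffixNum? pre s.toList with
        | some v => PySem.Set.add u v | none => u) acc
      ↔ k ∈ acc ∨ ∃ s ∈ seen, pvSuffixNum? pre s.toList = some k := by
  induction seen with
  | nil => intro acc k; simp
  | cons s rest ih =>
      intro acc k
      simp only [List.foldl_cons]
      rw [ih]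
      cases hp : pvSuffixNum? pre s.toList with
      | none =>
          simp only [List.mem_cons]
          constructor
          · rintro (h | ⟨x, hx, he⟩)
            · exact Or.inl h
            · exact Or.inr ⟨x, Or.inr hx, he⟩
          · rintro (h | ⟨x, (rfl | hx), he⟩)
            · exact Or.inl h
            · rw [hp] at he; simp at he
            · exact Or.inr ⟨x, hx, he⟩
      | some v =>
          rw [PySem.Set.mem_add]
          constructor
          · rintro ((h | rfl) | ⟨x, hx, he⟩)
            · exact Or.inl h
            · exact Or.inr ⟨s, List.mem_cons_self .., hp⟩
            · exact Or.inr ⟨x, List.mem_cons_of_mem _ hx, he⟩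
          · rintro (h | ⟨x, hx, he⟩)
            · exact Or.inl (Or.inl h)
            · rcases List.mem_cons.mp hx with rfl | hx'
              · rw [hp] at he
                simp only [Option.some.injEq] at he
                exact Or.inl (Or.inr he.symm)
              · exact Or.inr ⟨x, hx', he⟩

theorem pv_mem_used (pre : List Char) (seen : List String) (k : Nat) :
    k ∈ pvUsed pre seen ↔ ∃ s ∈ seen, pvSuffixNum? pre s.toList = some k := by
  rw [pvUsed, pv_mem_used_aux]
  simp

theorem pv_used_aux_nodup (pre : List Char) (seen : List String) :
    ∀ (acc : PySem.Set Nat), acc.Nodup →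
      (seen.foldl (fun u s => match pvSuffixNum? pre s.toList with
        | some v => PySem.Set.add u v | none => u) acc).Nodup := by
  induction seen with
  | nil => intro acc h; simpa
  | cons s rest ih =>
      intro acc h
      simp only [List.foldl_cons]
      apply ih
      cases hp : pvSuffixNum? pre s.toList with
      | none => simpa
      | some v => exact PySem.Set.nodup_add acc v h

theorem pv_nodup_used (pre : List Char) (seen : List String) : (pvUsed pre seen).Nodup :=
  pv_used_aux_nodup pre seen [] (by simp)

theorem pv_used_aux_len (pre : List Char) (seen : List String) :
    ∀ (acc : PySem.Set Nat),
      (seen.foldl (fun u s => match pvSuffixNum? pre s.toList with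
        | some v => PySem.Set.add u v | none => u) acc).length ≤ acc.length + seen.length := by
  induction seen with
  | nil => intro acc; simp
  | cons s rest ih =>
      intro acc
      simp only [List.foldl_cons, List.length_cons]
      have step : (match pvSuffixNum? pre s.toList with
          | some v => PySem.Set.add acc v | none => acc).length ≤ acc.length + 1 := by
        cases pvSuffixNum? pre s.toList with
        | none => simp
        | some v =>
            show (PySem.Set.add acc v).length ≤ acc.length + 1
            unfold PySem.Set.add
            split_ifs <;> simp
      calc _ ≤ (match pvSuffixNum? pre s.toList with
          | some v => PySem.Set.add acc v | none => acc).length + rest.length := ih _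
        _ ≤ acc.length + (rest.length + 1) := by omega

theorem pv_length_used (pre : List Char) (seen : List String) :
    (pvUsed pre seen).length ≤ seen.length := by
  have := pv_used_aux_len pre seen []
  simpa using this

-- ---- the first-gap scan of a strictly increasing list ----

theorem pv_gapScan_facts (L : List Nat) (h : L.Pairwise (· < ·)) : ∀ (start : Nat),
    start ≤ pvGapScan L start ∧ pvGapScan L start ∉ L ∧
      ∀ k, start ≤ k → k < pvGapScan L start → k ∈ L := by
  induction L with
  | nil => intro start; refine ⟨le_refl _, by simp, ?_⟩; intro k h1 h2; simp [pvGapScan] at h2; omega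
  | cons n rest ih =>
      intro start
      have hrest : rest.Pairwise (· < ·) := (List.pairwise_cons.mp h).2
      have hgt : ∀ m ∈ rest, n < m := (List.pairwise_cons.mp h).1
      by_cases h1 : n = start
      · subst h1
        simp only [pvGapScan, if_true]
        obtain ⟨ha, hb, hc⟩ := ih hrest (n + 1)
        refine ⟨by omega, ?_, ?_⟩
        · simp only [List.mem_cons]
          rintro (he | he)
          · omega
          · exact hb he
        · intro k hk1 hk2
          rcases Nat.eq_or_lt_of_le hk1 with rfl | hk1'
          · exact List.mem_cons_self ..
          · exact List.mem_cons_of_mem _ (hc k (by omega) hk2)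
      · by_cases h2 : start < n
        · simp only [pvGapScan, if_neg h1, if_pos h2]
          refine ⟨le_refl _, ?_, ?_⟩
          · simp only [List.mem_cons]
            rintro (he | he)
            · omega
            · have := hgt _ he; omega
          · intro k hk1 hk2; omega
        · have h3 : n < start := by omega
          simp only [pvGapScan, if_neg h1, if_neg h2]
          obtain ⟨ha, hb, hc⟩ := ih hrest start
          refine ⟨ha, ?_, ?_⟩
          · simp only [List.mem_cons]
            rintro (he | he)
            · omega
            · exact hb he
          · intro k hk1 hk2
            exact List.mem_cons_of_mem _ (hc k hk1 hk2)

-- ---- A's probe loop via an abstract first-free search ----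

def pvFirstFree (we : String) (seen : List String) : Nat → Nat → Nat
  | 0, start => start
  | fuel + 1, start =>
      if (we ++ "#" ++ PySem.Int.toStr (Int.ofNat start)) ∈ seen then
        pvFirstFree we seen fuel (start + 1)
      else start

theorem pvA_loop_eq_firstFree (we : String) (seen : List String) :
    ∀ (fuel start : Nat),
      pvA_loop we seen (Int.ofNat start) fuel
        = we ++ "#" ++ PySem.Int.toStr (Int.ofNat (pvFirstFree we seen fuel start)) := by
  intro fuel
  induction fuel with
  | zero => intro start; simp [pvA_loop, pvFirstFree]
  | succ n ih =>
      intro start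
      have hcast : (Int.ofNat start) + 1 = Int.ofNat (start + 1) := rfl
      simp only [pvA_loop, pvFirstFree, hcast]
      split
      · exact ih (start + 1)
      · rfl

theorem pvFirstFree_eq (we : String) (seen : List String) (M : Nat)
    (hM : (we ++ "#" ++ PySem.Int.toStr (Int.ofNat M)) ∉ seen) :
    ∀ (fuel start : Nat), start ≤ M → M ≤ start + fuel →
      (∀ k, start ≤ k → k < M → (we ++ "#" ++ PySem.Int.toStr (Int.ofNat k)) ∈ seen) →
      pvFirstFree we seen fuel start = M := by
  intro fuel
  induction fuel with
  | zero =>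
      intro start h1 h2 _
      have : start = M := by omega
      simpa [pvFirstFree]
  | succ n ih =>
      intro start h1 h2 hbelow
      simp only [pvFirstFree]
      by_cases hs : (we ++ "#" ++ PySem.Int.toStr (Int.ofNat start)) ∈ seen
      · rw [if_pos hs]
        have hne : start ≠ M := fun he => hM (he ▸ hs)
        exact ih (start + 1) (by omega) (by omega) (fun k hk1 hk2 => hbelow k (by omega) hk2)
      · rw [if_neg hs]
        rcases Nat.eq_or_lt_of_le h1 with he | hlt
        · exact he
        · exact absurd (hbelow start (le_refl _) hlt) hs

-- ---- bridging strings and the final equality ----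

theorem pv_cand_toList (we : String) (k : Nat) :
    (we ++ "#" ++ PySem.Int.toStr (Int.ofNat k)).toList
      = (we ++ "#").toList ++ Nat.toDigits 10 k := by
  simp [PySem.Int.toList_toStr, PySem.Int.toChars]

theorem pv_mem_used_iff_cand (we : String) (seen : List String) (k : Nat) :
    k ∈ pvUsed (we ++ "#").toList seen
      ↔ 1 ≤ k ∧ (we ++ "#" ++ PySem.Int.toStr (Int.ofNat k)) ∈ seen := by
  rw [pv_mem_used]
  constructor
  · rintro ⟨s, hs, hp⟩
    obtain ⟨he, hk⟩ := pv_parse_sound _ _ _ hp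
    refine ⟨hk, ?_⟩
    have : (we ++ "#" ++ PySem.Int.toStr (Int.ofNat k)).toList = s.toList := by
      rw [pv_cand_toList, he]
    have heq : (we ++ "#" ++ PySem.Int.toStr (Int.ofNat k)) = s := String.toList_inj.mp this
    rwa [heq]
  · rintro ⟨hk, hmem⟩
    refine ⟨we ++ "#" ++ PySem.Int.toStr (Int.ofNat k), hmem, ?_⟩
    rw [pv_cand_toList]
    exact pv_parse_cand _ k hk

theorem unique_section_id_py_eq_alt (base element_id : String) (seen : List String) :
    unique_section_id_py base element_id seen = unique_section_id_py_alt base element_id seen := by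
  unfold unique_section_id_py unique_section_id_py_alt
  by_cases hb : base ∈ seen
  · by_cases hw : (base ++ " [" ++ element_id ++ "]") ∈ seen
    · simp only [hb, hw, not_true, ite_false]
      set we := base ++ " [" ++ element_id ++ "]" with hwe
      set used := pvUsed (we ++ "#").toList seen with hused
      set L := PySem.List.sorted used (fun n => n) with hL
      have hperm : L.Perm used := PySem.List.sorted_perm used (fun n => n) false
      have hnodupL : L.Nodup := hperm.nodup_iff.mpr (pv_nodup_used _ _)
      have hpl : L.Pairwise (· < ·) := by
        have hle : L.Pairwise (fun a b => a ≤ b) := PySem.List.sorted_pairwise used (fun n => n)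
        exact (hle.and hnodupL).imp (fun h => lt_of_le_of_ne h.1 h.2)
      set M := pvGapScan L 2 with hM
      obtain ⟨hstart, hnotin, hbelowL⟩ := pv_gapScan_facts L hpl 2
      have hMnotseen : (we ++ "#" ++ PySem.Int.toStr (Int.ofNat M)) ∉ seen := by
        intro hmem
        exact hnotin (hperm.mem_iff.mpr ((pv_mem_used_iff_cand we seen M).mpr ⟨by omega, hmem⟩))
      have hbelow : ∀ k, 2 ≤ k → k < M → (we ++ "#" ++ PySem.Int.toStr (Int.ofNat k)) ∈ seen := by
        intro k h1 h2
        exact ((pv_mem_used_iff_cand we seen k).mp (hperm.mem_iff.mp (hbelowL k h1 h2))).2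
      have hbound : M ≤ seen.length + 2 := by
        have hsub : List.range' 2 (M - 2) ⊆ used := by
          intro x hx
          rw [List.mem_range'] at hx
          obtain ⟨i, hi, rfl⟩ := hx
          exact hperm.mem_iff.mp (hbelowL _ (by omega) (by omega))
        have h1 := (List.subperm_of_subset (List.nodup_range' 1) hsub).length_le
        simp only [List.length_range'] at h1
        have h2 : used.length ≤ seen.length := by
          rw [hused]; exact pv_length_used _ _
        omega
      have h2 : (2 : Int) = Int.ofNat 2 := rfl
      rw [h2, pvA_loop_eq_firstFree we seen (seen.length + 1) 2,
          pvFirstFree_eq we seen M hMnotseen (seen.length + 1) 2 (by omega) (by omega)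
            (fun k hk1 hk2 => hbelow k hk1 hk2)]
    · simp [hb, hw]
  · simp [hb]

-- ===== VERDICT (by name: the statement is the Claim_ definition above) =====
theorem unique_section_id_py_spec : Claim_equal_unique_section_id_py := by
  intro base element_id seen _
  unfold Spec_unique_section_id_py
  exact unique_section_id_py_eq_alt base element_id seen
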